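-- pv_equiv track=rewrite | github.com/chika-dueke-eze/EGR103F20 | APT Problems/BagFitter.py | bags
-- ===== SOURCE A (Python) =====
-- import math
--
-- def bags(strength, food):
--
--     """
--     return int based on parameters strength, an int
--     and food a list of Strings
--     """
--     each_food = set(food)                   #gets unique elements of items in food list.
--     count = 0
--     for i in each_food:
--         sum_each_food = food.count(i)
--         bags_needed = math.ceil(sum_each_food/strength)     #returns the number of bags needed to pack groceries
--         count = count + bags_needed
--     return count
-- ===== SOURCE B (Python) =====
-- def bags(strength, food):
--     # Sort a copy of food once, then tally bags in one grouped scan over the sorted list.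
--     ys = sorted(food)
--     total = 0
--     i = 0
--     n = len(ys)
--     while i < n:
--         j = i + 1
--         while j < n and ys[j] == ys[i]:
--             j += 1
--         total += -(-(j - i) // strength)
--         i = j
--     return total
-- ===== Notes on version B (the rewrite author's own statement) =====
-- stated objective: faster
-- what changed: Replaces the set of distinct foods plus a full food.count() scan per distinct food with one sort of a copy of food followed by a single grouped scan over the sorted list, adding ceil(run/strength) per run of equal values via integer ceiling division -(-run // strength).
import Mathlib
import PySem

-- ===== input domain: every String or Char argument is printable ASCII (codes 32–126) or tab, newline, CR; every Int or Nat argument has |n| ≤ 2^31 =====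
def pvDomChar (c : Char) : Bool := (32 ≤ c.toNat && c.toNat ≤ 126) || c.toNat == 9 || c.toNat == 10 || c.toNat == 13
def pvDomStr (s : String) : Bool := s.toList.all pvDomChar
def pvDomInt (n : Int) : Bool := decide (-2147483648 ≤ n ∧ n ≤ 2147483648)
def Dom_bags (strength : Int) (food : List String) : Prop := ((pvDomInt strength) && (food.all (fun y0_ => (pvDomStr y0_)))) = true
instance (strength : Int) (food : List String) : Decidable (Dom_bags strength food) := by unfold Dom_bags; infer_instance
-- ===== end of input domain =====

-- B replaces A's set + per-distinct-element food.count() scans with one sort of a copy of the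
-- list followed by a single grouped scan adding ceil(run/strength) per run of equal values.
-- math.ceil(n/strength) is ported as exact ceiling division -((-n) // strength): exact here since
-- n is a list count and |strength| ≤ 2^31 on the domain, so the float quotient never rounds across an integer.


-- ===== PORT A =====
-- each_food = set(food); for i in each_food: count += ceil(food.count(i)/strength)
-- (the sum over the set is iteration-order independent, so folding in first-insertion order is exact)
def bags (strength : Int) (food : List String) : Int :=
  let each_food := PySem.Set.ofList food
  each_food.foldl
    (fun count i =>
      let sum_each_food : Int := (PySem.List.count food i : Int)
      let bags_needed : Int := -(PySem.Int.floordiv (-sum_each_food) strength)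
      count + bags_needed) 0

-- ===== PORT B =====
-- the outer while loop of Source B: each step consumes one run of equal values from the front of the
-- still-unprocessed suffix of the sorted list (the inner 'while ys[j] == ys[i]' scan is the
-- takeWhile/dropWhile split, j - i = 1 + run length) and adds ceil(run/strength) to total
def bagsRuns (strength : Int) (total : Int) : List String → Int
  | [] => total
  | x :: xs =>
      bagsRuns strength
        (total + -(PySem.Int.floordiv (-(1 + ((xs.takeWhile (fun y => y == x)).length : Int))) strength))
        (xs.dropWhile (fun y => y == x))
termination_by l => l.length
decreasing_by exact Nat.lt_succ_of_le (List.length_dropWhile_le _ _)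

-- ys = sorted(food); then the grouped scan with total = 0, i = 0
def bags_alt (strength : Int) (food : List String) : Int :=
  bagsRuns strength 0 (PySem.List.sorted food (fun x => x) false)

-- ===== PRECONDITION & SPEC =====
-- Pre_ excludes strength = 0 with nonempty food: there both Pythons raise ZeroDivisionError.
def Pre_bags (strength : Int) (food : List String) : Prop := food ≠ [] → strength ≠ 0
instance (strength : Int) (food : List String) : Decidable (Pre_bags strength food) := by unfold Pre_bags; infer_instance
def pvWitness_bags : Int × List String := (2, ["a", "b", "a"])
def Spec_bags (strength : Int) (food : List String) (out : Int) : Prop := out = bags_alt strength food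
instance (strength : Int) (food : List String) (out : Int) : Decidable (Spec_bags strength food out) := by unfold Spec_bags; infer_instance

-- ===== CLAIM (what is proved, stated in full; the proofs are below) =====
def Claim_equal_bags : Prop := ∀ (strength : Int) (food : List String), Dom_bags strength food → Pre_bags strength food → Spec_bags strength food (bags strength food)

-- ===== LEMMAS AND PROOFS =====

-- the common value: sum over the distinct elements of l of ceil(count l x / strength)
def bagsSpecSum (strength : Int) (l : List String) : Int :=
  ((PySem.List.dedup l).map
    (fun x => -(PySem.Int.floordiv (-(PySem.List.count l x : Int)) strength))).sum

theorem bags_eq_specSum (strength : Int) (food : List String) :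
    bags strength food = bagsSpecSum strength food := by
  unfold bags bagsSpecSum
  rw [PySem.List.foldl_add]
  simp [PySem.List.dedup_eq_ofList]

-- in a sorted list x :: xs, everything after the leading run of x's differs from x
theorem dropWhile_not_mem (x : String) :
    ∀ (xs : List String), (∀ y ∈ xs, x ≤ y) → xs.Pairwise (· ≤ ·) →
      x ∉ xs.dropWhile (fun y => y == x)
  | [], _, _ => by simp
  | z :: t, hge, hp => by
    by_cases hz : (z == x) = true
    · simp only [List.dropWhile_cons, hz]
      exact dropWhile_not_mem x t (fun y hy => hge y (List.mem_cons_of_mem _ hy)) hp.of_cons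
    · simp only [List.dropWhile_cons, hz]
      have hzx : x < z := lt_of_le_of_ne (hge z (List.mem_cons_self)) (by
        intro h; exact hz (by simp [h.symm]))
      intro hmem
      rcases List.mem_cons.mp hmem with h | h
      · exact absurd h.symm (ne_of_gt hzx)
      · have : z ≤ x := le_trans (List.rel_of_pairwise_cons hp h) le_rfl
        exact absurd this (not_le.mpr hzx)

-- grouped-scan invariant: on a sorted suffix, bagsRuns adds exactly bagsSpecSum of that suffix
theorem bagsRuns_eq (strength : Int) :
    ∀ (ys : List String) (total : Int), ys.Pairwise (· ≤ ·) →
      bagsRuns strength total ys = total + bagsSpecSum strength ys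
  | [], total, _ => by simp [bagsRuns, bagsSpecSum]
  | x :: xs, total, hp => by
    have hall : ∀ y ∈ xs, x ≤ y := fun y hy => List.rel_of_pairwise_cons hp hy
    have hpxs : xs.Pairwise (· ≤ ·) := hp.of_cons
    set run := xs.takeWhile (fun y => y == x) with hrun
    set rest := xs.dropWhile (fun y => y == x) with hrest
    have hsplit : run ++ rest = xs := List.takeWhile_append_dropWhile
    have hrunx : ∀ y ∈ run, y = x := by
      intro y hy
      have := List.mem_takeWhile_imp hy
      exact eq_of_beq this
    have hxrest : x ∉ rest := dropWhile_not_mem x xs hall hpxs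
    have hprest : rest.Pairwise (· ≤ ·) := hpxs.sublist (List.dropWhile_sublist _)
    -- count facts
    have hcount_run : run.count x = run.length :=
      List.count_eq_length.mpr (fun y hy => ((hrunx y hy).symm ▸ rfl))
    have hcount_rest0 : rest.count x = 0 := List.count_eq_zero.mpr hxrest
    have hcount_xs : xs.count x = run.length := by
      rw [← hsplit, List.count_append, hcount_run, hcount_rest0]
      omega
    have hcount_other : ∀ y, y ≠ x → xs.count y = rest.count y := by
      intro y hy
      rw [← hsplit, List.count_append]
      have : run.count y = 0 := List.count_eq_zero.mpr (fun hmem => hy (hrunx y hmem))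
      omega
    -- the distinct elements of x :: xs other than x are exactly the distinct elements of rest
    have hperm : (PySem.Set.discard (PySem.Set.ofList xs) x).Perm (PySem.List.dedup rest) := by
      apply (List.perm_ext_iff_of_nodup
        (PySem.Set.nodup_discard _ _ (PySem.Set.nodup_ofList _)) (PySem.List.nodup_dedup _)).mpr
      intro y
      rw [PySem.Set.mem_discard, PySem.Set.mem_ofList, PySem.List.mem_dedup]
      constructor
      · rintro ⟨hyxs, hyx⟩
        rw [← hsplit, List.mem_append] at hyxs
        rcases hyxs with h | h
        · exact absurd (hrunx y h) hyx
        · exact h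
      · intro hyrest
        refine ⟨?_, fun h => hxrest (h ▸ hyrest)⟩
        rw [← hsplit]; exact List.mem_append_right _ hyrest
    have hrec := bagsRuns_eq strength rest
      (total + -(PySem.Int.floordiv (-(1 + (run.length : Int))) strength)) hprest
    show bagsRuns strength total (x :: xs) = _
    rw [bagsRuns, ← hrun, ← hrest, hrec]
    have hdedup : PySem.List.dedup (x :: xs) = x :: PySem.Set.discard (PySem.Set.ofList xs) x := by
      simp [PySem.List.dedup_eq_ofList, PySem.Set.ofList_cons]
    have hsum_eq :
        ((PySem.Set.discard (PySem.Set.ofList xs) x).map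
          (fun y => -(PySem.Int.floordiv (-(PySem.List.count (x :: xs) y : Int)) strength))).sum
        = bagsSpecSum strength rest := by
      unfold bagsSpecSum
      refine List.Perm.sum_eq ?_
      refine (hperm.map _).trans ?_
      apply List.Perm.of_eq
      apply List.map_congr_left
      intro y hy
      have hyx : y ≠ x := by
        have := (PySem.List.mem_dedup ..).mp hy
        intro h; exact hxrest (h ▸ this)
      simp only [PySem.List.count_eq]
      rw [List.count_cons_of_ne (Ne.symm hyx), hcount_other y hyx]
    unfold bagsSpecSum
    rw [hdedup, List.map_cons, List.sum_cons]
    have hcx : PySem.List.count (x :: xs) x = run.length + 1 := by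
      simp [PySem.List.count_eq, hcount_xs]
    rw [hcx]
    have := hsum_eq
    unfold bagsSpecSum at this
    rw [show ((PySem.Set.discard (PySem.Set.ofList xs) x).map
          (fun y => -(PySem.Int.floordiv (-(PySem.List.count (x :: xs) y : Int)) strength))).sum
        = ((PySem.List.dedup rest).map
          (fun y => -(PySem.Int.floordiv (-(PySem.List.count rest y : Int)) strength))).sum from this]
    push_cast
    rw [show -(1 + (run.length : Int)) = -((run.length : Int) + 1) by ring]
    ring
termination_by ys => ys.length
decreasing_by exact Nat.lt_succ_of_le (List.length_dropWhile_le _ _)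

-- bagsSpecSum is invariant under permutation of the underlying list
theorem bagsSpecSum_perm (strength : Int) (l₁ l₂ : List String) (h : l₁.Perm l₂) :
    bagsSpecSum strength l₁ = bagsSpecSum strength l₂ := by
  unfold bagsSpecSum
  have hd : (PySem.List.dedup l₁).Perm (PySem.List.dedup l₂) := by
    apply (List.perm_ext_iff_of_nodup (PySem.List.nodup_dedup _) (PySem.List.nodup_dedup _)).mpr
    intro y
    rw [PySem.List.mem_dedup, PySem.List.mem_dedup]
    exact ⟨fun hy => h.mem_iff.mp hy, fun hy => h.mem_iff.mpr hy⟩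
  have hcnt : ∀ y, PySem.List.count l₁ y = PySem.List.count l₂ y := by
    intro y; simp [PySem.List.count_eq, h.count_eq]
  refine List.Perm.sum_eq ?_
  refine (hd.map _).trans ?_
  apply List.Perm.of_eq
  apply List.map_congr_left
  intro y _
  rw [hcnt y]

-- ===== VERDICT (by name: the statement is the Claim_ definition above) =====
theorem bags_spec : Claim_equal_bags := by
  intro strength food _ _
  unfold Spec_bags bags_alt
  have hs : (PySem.List.sorted food (fun x : String => x) false).Pairwise (· ≤ ·) :=
    PySem.List.sorted_pairwise food (fun x : String => x)
  have hperm : food.Perm (PySem.List.sorted food (fun x : String => x) false) :=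
    (PySem.List.sorted_perm food (fun x : String => x) false).symm
  rw [bags_eq_specSum, bagsRuns_eq strength _ 0 hs, bagsSpecSum_perm strength food _ hperm]
  ring
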